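-- pv_equiv track=rewrite | github.com/Marcomurgia97/Citation-Prediction-by-Leveraging-Transformers-and-Natural-Language-Processing-Heuristics | GenApproach/citationPrediction.py | selectIthWord
-- ===== SOURCE A (Python) =====
-- def selectIthWord(l, index):
--     cont = 0
--     toPrint = []
--     for word in l:
--         if word == '[cit]':
--             if cont == index:
--                 toPrint.append(word)
--             cont = cont + 1
--         elif word != '[cit]':
--             toPrint.append(word)
--
--     return toPrint
-- ===== SOURCE B (Python) =====
-- def selectIthWord(l, index):
--     positions = [i for i, w in enumerate(l) if w == '[cit]']
--     keep = positions[index] if 0 <= index < len(positions) else None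
--     return [w for i, w in enumerate(l) if w != '[cit]' or i == keep]
-- ===== Notes on version B (the rewrite author's own statement) =====
-- stated objective: alternative
-- what changed: Replaces the single loop with a running occurrence counter by a two-pass index-table formulation: first build the list of positions of '[cit]' tokens, select the kept position (or None) by direct indexing, then filter the enumerated list against that one position.
import Mathlib
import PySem

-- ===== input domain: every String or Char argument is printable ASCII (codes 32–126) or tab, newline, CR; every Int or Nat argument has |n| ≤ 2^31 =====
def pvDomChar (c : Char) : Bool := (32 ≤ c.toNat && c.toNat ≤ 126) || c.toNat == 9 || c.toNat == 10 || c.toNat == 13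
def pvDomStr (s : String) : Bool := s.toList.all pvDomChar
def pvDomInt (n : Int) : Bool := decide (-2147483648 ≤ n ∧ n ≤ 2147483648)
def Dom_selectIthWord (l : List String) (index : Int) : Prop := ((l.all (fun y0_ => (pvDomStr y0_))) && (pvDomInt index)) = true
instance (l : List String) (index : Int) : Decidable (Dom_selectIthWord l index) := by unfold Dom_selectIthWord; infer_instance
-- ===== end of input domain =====

-- B replaces A's running-counter loop by a two-pass index-table formulation (same cost, alternative decomposition).


-- ===== PORT A =====
-- Port of A: foldl over l with state (cont, toPrint), exactly the Python loop.
def selectIthWord (l : List String) (index : Int) : List String :=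
  (l.foldl (fun st word =>
      if word == "[cit]" then
        (st.1 + 1, if st.1 == index then st.2 ++ [word] else st.2)
      else
        (st.1, st.2 ++ [word]))
    ((0 : Int), ([] : List String))).2

-- ===== PORT B =====
-- Port of B: positions table of the '[cit]' tokens, the kept position (or none), one filter.
def selectIthWord_alt (l : List String) (index : Int) : List String :=
  let positions := ((PySem.List.enumerate l 0).filter (fun p => p.2 == "[cit]")).map (fun p => p.1)
  let keep : Option Int :=
    if 0 ≤ index ∧ index < positions.length then PySem.List.pyGet? positions index else none
  ((PySem.List.enumerate l 0).filter (fun p => p.2 != "[cit]" || keep == some p.1)).map (fun p => p.2)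

-- ===== PRECONDITION & SPEC =====
def Spec_selectIthWord (l : List String) (index : Int) (out : List String) : Prop := out = selectIthWord_alt l index
instance (l : List String) (index : Int) (out : List String) : Decidable (Spec_selectIthWord l index out) := by unfold Spec_selectIthWord; infer_instance

-- ===== CLAIM (what is proved, stated in full; the proofs are below) =====
def Claim_equal_selectIthWord : Prop := ∀ (l : List String) (index : Int), Dom_selectIthWord l index → Spec_selectIthWord l index (selectIthWord l index)

-- ===== LEMMAS AND PROOFS =====

-- positions of '[cit]' tokens, counting from k
def pvPos : List String → Int → List Int
  | [], _ => []
  | w :: ws, k => if w == "[cit]" then k :: pvPos ws (k + 1) else pvPos ws (k + 1)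

-- the filtering pass of B, with the current position k and the fixed kept position
def pvFil : List String → Int → Option Int → List String
  | [], _, _ => []
  | w :: ws, k, keep =>
    if w == "[cit]" then
      if keep == some k then w :: pvFil ws (k + 1) keep else pvFil ws (k + 1) keep
    else w :: pvFil ws (k + 1) keep

def pvKeep (ps : List Int) (index : Int) : Option Int :=
  if 0 ≤ index ∧ index < ps.length then PySem.List.pyGet? ps index else none

-- the common recursive middle form: index decremented at each '[cit]'
def pvG : List String → Int → List String
  | [], _ => []
  | w :: ws, index =>
    if w == "[cit]" then
      if index == 0 then w :: pvG ws (index - 1) else pvG ws (index - 1)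
    else w :: pvG ws index

theorem pvA_foldl (l : List String) (index cont : Int) (acc : List String) :
    (l.foldl (fun st word =>
      if word == "[cit]" then
        (st.1 + 1, if st.1 == index then st.2 ++ [word] else st.2)
      else
        (st.1, st.2 ++ [word])) (cont, acc)).2
    = acc ++ pvG l (index - cont) := by
  induction l generalizing cont acc with
  | nil => simp [pvG]
  | cons w ws ih =>
    by_cases hw : w == "[cit]"
    · have hiff : (cont == index) = ((index - cont) == 0) := by
        by_cases h : cont = index
        · simp [h]
        · simp [h]; omega
      simp only [List.foldl_cons, hw, if_pos, ih, pvG, hiff]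
      have : index - cont - 1 = index - (cont + 1) := by omega
      by_cases h0 : ((index - cont) == 0) <;> simp [h0, this]
    · simp only [List.foldl_cons, hw, ih, pvG]
      simp

theorem pvFil_spec (l : List String) (s : Int) (keep : Option Int) :
    ((PySem.List.enumerate l s).filter (fun p => p.2 != "[cit]" || keep == some p.1)).map (fun p => p.2)
    = pvFil l s keep := by
  induction l generalizing s with
  | nil => simp [PySem.List.enumerate_nil, pvFil]
  | cons w ws ih =>
    rw [PySem.List.enumerate_cons, List.filter_cons]
    by_cases hc : ((s, w).2 != "[cit]" || keep == some (s, w).1) = true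
    · rw [if_pos hc, List.map_cons, ih]
      by_cases hw : w = "[cit]"
      · have hk : keep = some s := by simpa [hw] using hc
        simp [pvFil, hw, hk]
      · simp [pvFil, hw]
    · rw [if_neg hc, ih]
      have hco : w = "[cit]" ∧ ¬ keep = some s := by simpa using hc
      simp [pvFil, hco.1, hco.2]

theorem pvPos_spec (l : List String) (s : Int) :
    ((PySem.List.enumerate l s).filter (fun p => p.2 == "[cit]")).map (fun p => p.1)
    = pvPos l s := by
  induction l generalizing s with
  | nil => simp [PySem.List.enumerate_nil, pvPos]
  | cons w ws ih =>
    simp only [PySem.List.enumerate_cons, List.filter_cons, pvPos]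
    by_cases hw : w == "[cit]"
    · simp [hw, ih]
    · simp [hw, ih]

theorem pvPos_ge (l : List String) (k x : Int) (hx : x ∈ pvPos l k) : k ≤ x := by
  induction l generalizing k with
  | nil => simp [pvPos] at hx
  | cons w ws ih =>
    simp only [pvPos] at hx
    by_cases hw : w == "[cit]"
    · simp [hw] at hx
      rcases hx with h | h
      · omega
      · have := ih (k + 1) h; omega
    · simp [hw] at hx
      have := ih (k + 1) hx; omega

theorem pvFil_irrel (l : List String) (m k : Int) (hk : k < m) :
    pvFil l m (some k) = pvFil l m none := by
  induction l generalizing m with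
  | nil => rfl
  | cons w ws ih =>
    simp only [pvFil]
    by_cases hw : w == "[cit]"
    · have hne : (some k == some m) = false := by simp; omega
      simp [hw, hne, ih (m + 1) (by omega)]
    · simp [hw, ih (m + 1) (by omega)]

theorem pvKeep_cons_ne (p : Int) (ps : List Int) (index : Int) (h0 : index ≠ 0) :
    pvKeep (p :: ps) index = pvKeep ps (index - 1) := by
  unfold pvKeep
  by_cases hpos : 1 ≤ index
  · by_cases hlt : index < (p :: ps).length
    · have h1 : 0 ≤ index ∧ index < (p :: ps).length := ⟨by omega, hlt⟩
      have h2 : 0 ≤ index - 1 ∧ index - 1 < (ps.length : Int) := by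
        simp at hlt; constructor <;> omega
      rw [if_pos h1, if_pos h2]
      rw [PySem.List.pyGet?_of_nonneg _ (by omega : (0:Int) ≤ index),
          PySem.List.pyGet?_of_nonneg _ (by omega : (0:Int) ≤ index - 1)]
      have ht : index.toNat = (index - 1).toNat + 1 := by omega
      rw [ht, List.getElem?_cons_succ]
    · have hlen : ¬ (index < ((p :: ps).length : Int)) := hlt
      simp only [List.length_cons] at hlen
      push_cast at hlen
      rw [if_neg (by simp only [List.length_cons]; push_cast; omega), if_neg (by omega)]
  · rw [if_neg (by omega), if_neg (by omega)]

theorem pvG_eq_pvFil (l : List String) (k index : Int) :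
    pvG l index = pvFil l k (pvKeep (pvPos l k) index) := by
  induction l generalizing k index with
  | nil => rfl
  | cons w ws ih =>
    by_cases hw : w == "[cit]"
    · have hpos : pvPos (w :: ws) k = k :: pvPos ws (k + 1) := by simp [pvPos, hw]
      by_cases h0 : index = 0
      · subst h0
        have hkeep : pvKeep (pvPos (w :: ws) k) 0 = some k := by
          rw [hpos]; unfold pvKeep
          rw [if_pos (by refine ⟨by omega, ?_⟩; simp only [List.length_cons]; push_cast; omega)]
          exact PySem.List.pyGet?_zero_cons _ _
        have h1 := pvFil_irrel ws (k + 1) k (by omega)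
        have h2 : pvKeep (pvPos ws (k + 1)) (-1 : Int) = none := by
          unfold pvKeep; rw [if_neg (by omega)]
        simp only [pvG, pvFil, hw, hkeep]
        simp only [show ((0 : Int) - 1) = -1 from by norm_num, h1, ih (k + 1) (-1 : Int), h2]
        simp
      · have hkeep : pvKeep (pvPos (w :: ws) k) index = pvKeep (pvPos ws (k + 1)) (index - 1) := by
          rw [hpos]; exact pvKeep_cons_ne _ _ _ h0
        have hne : (pvKeep (pvPos ws (k + 1)) (index - 1) == some k) = false := by
          cases hcase : pvKeep (pvPos ws (k + 1)) (index - 1) with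
          | none => rfl
          | some j =>
            have hj : j ∈ pvPos ws (k + 1) := by
              unfold pvKeep at hcase
              by_cases hc : 0 ≤ index - 1 ∧ index - 1 < ((pvPos ws (k + 1)).length : Int)
              · rw [if_pos hc] at hcase
                exact PySem.List.mem_of_pyGet?_eq_some _ hcase
              · rw [if_neg hc] at hcase; cases hcase
            have := pvPos_ge ws (k + 1) j hj
            simp; omega
        have hb : (index == 0) = false := by simp [h0]
        simp only [pvG, pvFil, hw, hkeep, hne, hb]
        simp only [Bool.false_eq_true, if_false]
        exact ih (k + 1) (index - 1)
    · have hpos : pvPos (w :: ws) k = pvPos ws (k + 1) := by simp [pvPos, hw]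
      have hb : (w == "[cit]") = false := by simpa using hw
      simp only [pvG, pvFil, hb, hpos]
      simp only [Bool.false_eq_true, if_false]
      rw [ih (k + 1) index]

-- ===== VERDICT (by name: the statement is the Claim_ definition above) =====
theorem selectIthWord_spec : Claim_equal_selectIthWord := by
  intro l index _
  unfold Spec_selectIthWord selectIthWord selectIthWord_alt
  rw [pvFil_spec, pvPos_spec]
  have ha := pvA_foldl l index 0 []
  simp only [List.nil_append, Int.sub_zero] at ha
  rw [ha, pvG_eq_pvFil l 0 index]
  rfl
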